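-- pv_equiv track=rewrite | github.com/ramarora09/Carrer-Baba-Ai | career_baba_ai/utils/roadmap.py | generate_roadmap
-- ===== SOURCE A (Python) =====
-- def generate_roadmap(role, missing_skills, time="3-6 months"):
--
--     roadmap = []
--
--     # ---------------- TIME BASED PLAN ----------------
--     if time == "1-2 months":
--         roadmap.append("Step 1: Learn basic concepts quickly")
--         roadmap.append("Step 2: Focus on 1-2 important skills")
--         roadmap.append("Step 3: Build 1 small project")
--         roadmap.append("Step 4: Revise and practice")
--
--     elif time == "3-6 months":
--         roadmap.append("Step 1: Build strong fundamentals")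
--         roadmap.append("Step 2: Learn core skills deeply")
--         roadmap.append("Step 3: Build 2-3 real-world projects")
--         roadmap.append("Step 4: Start applying for internships/jobs")
--
--     else:
--         roadmap.append("Step 1: Master core concepts")
--         roadmap.append("Step 2: Learn advanced topics")
--         roadmap.append("Step 3: Build industry-level projects")
--         roadmap.append("Step 4: Prepare for interviews")
--
--     # ---------------- SKILL BASED ADDITION ----------------
--     for skill in missing_skills[:3]:
--         roadmap.append(f"Step {len(roadmap)+1}: Learn {skill}")
--
--     # ---------------- ROLE BASED CUSTOMIZATION ----------------
--     if "Data" in role or "AI" in role: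
--         roadmap.append(f"Step {len(roadmap)+1}: Work on ML/AI projects")
--         roadmap.append(f"Step {len(roadmap)+1}: Practice data analysis")
--
--     elif "Frontend" in role:
--         roadmap.append(f"Step {len(roadmap)+1}: Build UI projects using React")
--         roadmap.append(f"Step {len(roadmap)+1}: Improve UI/UX skills")
--
--     elif "Backend" in role:
--         roadmap.append(f"Step {len(roadmap)+1}: Build APIs and backend systems")
--         roadmap.append(f"Step {len(roadmap)+1}: Learn databases deeply")
--
--     elif "DevOps" in role or "Cloud" in role:
--         roadmap.append(f"Step {len(roadmap)+1}: Practice deployments")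
--         roadmap.append(f"Step {len(roadmap)+1}: Learn cloud services")
--
--     elif "Cyber" in role:
--         roadmap.append(f"Step {len(roadmap)+1}: Practice security tools")
--         roadmap.append(f"Step {len(roadmap)+1}: Learn ethical hacking")
--
--     # ---------------- FINAL STEP ----------------
--     roadmap.append(f"Step {len(roadmap)+1}: Prepare resume and apply for {role} roles")
--
--     return roadmap
-- ===== SOURCE B (Python) =====
-- def generate_roadmap(role, missing_skills, time="3-6 months"):
--     base = {
--         "1-2 months": [
--             "Learn basic concepts quickly",
--             "Focus on 1-2 important skills",
--             "Build 1 small project",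
--             "Revise and practice",
--         ],
--         "3-6 months": [
--             "Build strong fundamentals",
--             "Learn core skills deeply",
--             "Build 2-3 real-world projects",
--             "Start applying for internships/jobs",
--         ],
--     }
--     steps = base.get(time, [
--         "Master core concepts",
--         "Learn advanced topics",
--         "Build industry-level projects",
--         "Prepare for interviews",
--     ])
--     steps = steps + [f"Learn {skill}" for skill in missing_skills[:3]]
--     if "Data" in role or "AI" in role:
--         steps = steps + ["Work on ML/AI projects", "Practice data analysis"]
--     elif "Frontend" in role:
--         steps = steps + ["Build UI projects using React", "Improve UI/UX skills"]
--     elif "Backend" in role: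
--         steps = steps + ["Build APIs and backend systems", "Learn databases deeply"]
--     elif "DevOps" in role or "Cloud" in role:
--         steps = steps + ["Practice deployments", "Learn cloud services"]
--     elif "Cyber" in role:
--         steps = steps + ["Practice security tools", "Learn ethical hacking"]
--     steps = steps + [f"Prepare resume and apply for {role} roles"]
--     return [f"Step {i}: {text}" for i, text in enumerate(steps, 1)]
-- ===== Notes on version B (the rewrite author's own statement) =====
-- stated objective: simpler
-- what changed: B first collects bare step descriptions (a dict lookup for the time-based base plan, a comprehension over missing_skills[:3], role extras, resume) and formats/numbers them all in one final enumerate pass, instead of A's hard-coded step numbers and len(roadmap)+1 bookkeeping inside every branch.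
import Mathlib
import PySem

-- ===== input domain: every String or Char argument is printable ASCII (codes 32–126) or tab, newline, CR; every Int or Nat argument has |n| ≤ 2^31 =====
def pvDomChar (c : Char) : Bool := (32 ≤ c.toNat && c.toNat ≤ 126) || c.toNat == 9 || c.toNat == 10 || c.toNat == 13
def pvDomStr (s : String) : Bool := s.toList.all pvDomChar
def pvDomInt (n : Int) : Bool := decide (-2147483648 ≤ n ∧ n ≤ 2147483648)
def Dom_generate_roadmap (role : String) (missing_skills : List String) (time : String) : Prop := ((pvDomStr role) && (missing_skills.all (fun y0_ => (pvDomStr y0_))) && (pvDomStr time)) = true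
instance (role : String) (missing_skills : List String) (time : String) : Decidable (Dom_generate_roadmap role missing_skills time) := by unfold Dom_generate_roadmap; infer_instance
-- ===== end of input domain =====

-- B collects bare step descriptions first (dict-keyed base plan, comprehension over skills, role extras,
-- resume) and numbers/formats them in one final enumerate pass; objective: simpler (numbering out of the branches).


-- ===== PORT A =====
def generate_roadmap (role : String) (missing_skills : List String) (time : String) : List String :=
  let roadmap : List String :=
    if time == "1-2 months" then
      ["Step 1: Learn basic concepts quickly",
       "Step 2: Focus on 1-2 important skills",
       "Step 3: Build 1 small project",
       "Step 4: Revise and practice"]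
    else if time == "3-6 months" then
      ["Step 1: Build strong fundamentals",
       "Step 2: Learn core skills deeply",
       "Step 3: Build 2-3 real-world projects",
       "Step 4: Start applying for internships/jobs"]
    else
      ["Step 1: Master core concepts",
       "Step 2: Learn advanced topics",
       "Step 3: Build industry-level projects",
       "Step 4: Prepare for interviews"]
  let roadmap := (PySem.List.slice missing_skills none (some 3)).foldl
      (fun r skill => r ++ ["Step " ++ PySem.Int.toStr ((r.length : Int) + 1) ++ ": Learn " ++ skill]) roadmap
  let roadmap :=
    if PySem.Str.isIn "Data" role || PySem.Str.isIn "AI" role then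
      let r1 := roadmap ++ ["Step " ++ PySem.Int.toStr ((roadmap.length : Int) + 1) ++ ": Work on ML/AI projects"]
      r1 ++ ["Step " ++ PySem.Int.toStr ((r1.length : Int) + 1) ++ ": Practice data analysis"]
    else if PySem.Str.isIn "Frontend" role then
      let r1 := roadmap ++ ["Step " ++ PySem.Int.toStr ((roadmap.length : Int) + 1) ++ ": Build UI projects using React"]
      r1 ++ ["Step " ++ PySem.Int.toStr ((r1.length : Int) + 1) ++ ": Improve UI/UX skills"]
    else if PySem.Str.isIn "Backend" role then
      let r1 := roadmap ++ ["Step " ++ PySem.Int.toStr ((roadmap.length : Int) + 1) ++ ": Build APIs and backend systems"]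
      r1 ++ ["Step " ++ PySem.Int.toStr ((r1.length : Int) + 1) ++ ": Learn databases deeply"]
    else if PySem.Str.isIn "DevOps" role || PySem.Str.isIn "Cloud" role then
      let r1 := roadmap ++ ["Step " ++ PySem.Int.toStr ((roadmap.length : Int) + 1) ++ ": Practice deployments"]
      r1 ++ ["Step " ++ PySem.Int.toStr ((r1.length : Int) + 1) ++ ": Learn cloud services"]
    else if PySem.Str.isIn "Cyber" role then
      let r1 := roadmap ++ ["Step " ++ PySem.Int.toStr ((roadmap.length : Int) + 1) ++ ": Practice security tools"]
      r1 ++ ["Step " ++ PySem.Int.toStr ((r1.length : Int) + 1) ++ ": Learn ethical hacking"]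
    else roadmap
  roadmap ++ ["Step " ++ PySem.Int.toStr ((roadmap.length : Int) + 1) ++ ": Prepare resume and apply for " ++ role ++ " roles"]

-- ===== PORT B =====
-- f"Step {i}: {text}" for one (text, i) pair of enumerate(steps, 1)
def pvStepFmt (p : String × Nat) : String :=
  "Step " ++ PySem.Int.toStr (p.2 : Int) ++ ": " ++ p.1

def generate_roadmap_alt (role : String) (missing_skills : List String) (time : String) : List String :=
  let base : PySem.Dict String (List String) := PySem.Dict.ofList
    [("1-2 months",
      ["Learn basic concepts quickly", "Focus on 1-2 important skills",
       "Build 1 small project", "Revise and practice"]),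
     ("3-6 months",
      ["Build strong fundamentals", "Learn core skills deeply",
       "Build 2-3 real-world projects", "Start applying for internships/jobs"])]
  let steps := base.getD time
      ["Master core concepts", "Learn advanced topics",
       "Build industry-level projects", "Prepare for interviews"]
  let steps := steps ++ (PySem.List.slice missing_skills none (some 3)).map (fun skill => "Learn " ++ skill)
  let steps :=
    if PySem.Str.isIn "Data" role || PySem.Str.isIn "AI" role then
      steps ++ ["Work on ML/AI projects", "Practice data analysis"]
    else if PySem.Str.isIn "Frontend" role then
      steps ++ ["Build UI projects using React", "Improve UI/UX skills"]
    else if PySem.Str.isIn "Backend" role then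
      steps ++ ["Build APIs and backend systems", "Learn databases deeply"]
    else if PySem.Str.isIn "DevOps" role || PySem.Str.isIn "Cloud" role then
      steps ++ ["Practice deployments", "Learn cloud services"]
    else if PySem.Str.isIn "Cyber" role then
      steps ++ ["Practice security tools", "Learn ethical hacking"]
    else steps
  let steps := steps ++ ["Prepare resume and apply for " ++ role ++ " roles"]
  (steps.zipIdx 1).map pvStepFmt

-- ===== PRECONDITION & SPEC =====
def Spec_generate_roadmap (role : String) (missing_skills : List String) (time : String) (out : List String) : Prop := out = generate_roadmap_alt role missing_skills time
instance (role : String) (missing_skills : List String) (time : String) (out : List String) : Decidable (Spec_generate_roadmap role missing_skills time out) := by unfold Spec_generate_roadmap; infer_instance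

-- ===== CLAIM (what is proved, stated in full; the proofs are below) =====
def Claim_equal_generate_roadmap : Prop := ∀ (role : String) (missing_skills : List String) (time : String), Dom_generate_roadmap role missing_skills time → Spec_generate_roadmap role missing_skills time (generate_roadmap role missing_skills time)

-- ===== LEMMAS AND PROOFS =====

-- "number the step list": B's final formatting pass
def pvN (S : List String) : List String := (S.zipIdx 1).map pvStepFmt

-- bare base plan / role extras, shared reference points for both characterizations
def pvBase (time : String) : List String :=
  if time == "1-2 months" then
    ["Learn basic concepts quickly", "Focus on 1-2 important skills",
     "Build 1 small project", "Revise and practice"]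
  else if time == "3-6 months" then
    ["Build strong fundamentals", "Learn core skills deeply",
     "Build 2-3 real-world projects", "Start applying for internships/jobs"]
  else
    ["Master core concepts", "Learn advanced topics",
     "Build industry-level projects", "Prepare for interviews"]

def pvExtras (role : String) : List String :=
  if PySem.Str.isIn "Data" role || PySem.Str.isIn "AI" role then
    ["Work on ML/AI projects", "Practice data analysis"]
  else if PySem.Str.isIn "Frontend" role then
    ["Build UI projects using React", "Improve UI/UX skills"]
  else if PySem.Str.isIn "Backend" role then
    ["Build APIs and backend systems", "Learn databases deeply"]
  else if PySem.Str.isIn "DevOps" role || PySem.Str.isIn "Cloud" role then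
    ["Practice deployments", "Learn cloud services"]
  else if PySem.Str.isIn "Cyber" role then
    ["Practice security tools", "Learn ethical hacking"]
  else []

lemma pvN_length (X : List String) : (pvN X).length = X.length := by
  simp [pvN]

lemma pvN_snoc (X : List String) (t : String) :
    pvN (X ++ [t])
      = pvN X ++ [(("Step " ++ PySem.Int.toStr ((X.length : Int) + 1)) ++ ": ") ++ t] := by
  have hc : ((1 + X.length : Nat) : Int) = (X.length : Int) + 1 := by push_cast; ring
  simp [pvN, List.zipIdx_append, pvStepFmt, hc]

lemma pv_snoc (X : List String) (t : String) :
    pvN X ++ [(("Step " ++ PySem.Int.toStr (((pvN X).length : Int) + 1)) ++ ": ") ++ t]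
      = pvN (X ++ [t]) := by
  rw [pvN_length]; exact (pvN_snoc X t).symm

-- A appends "Step k: <s>" with s a merged literal ": " ++ t
lemma pv_snoc_any (X : List String) (s t : String) (h : s = ": " ++ t) :
    pvN X ++ [("Step " ++ PySem.Int.toStr (((pvN X).length : Int) + 1)) ++ s]
      = pvN (X ++ [t]) := by
  subst h; rw [← String.append_assoc, pv_snoc]

-- A's skill-loop shape: the merged literal has a free tail (": Learn " ++ skill)
lemma pv_snoc_mid (X : List String) (s p x : String) (h : s = ": " ++ p) :
    pvN X ++ [(("Step " ++ PySem.Int.toStr (((pvN X).length : Int) + 1)) ++ s) ++ x]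
      = pvN (X ++ [p ++ x]) := by
  subst h
  rw [← String.append_assoc (s₁ := "Step " ++ PySem.Int.toStr (((pvN X).length : Int) + 1)) (s₂ := ": ") (s₃ := p),
      String.append_assoc (s₂ := p) (s₃ := x), pv_snoc]

lemma pv_snoc_res (X : List String) (role : String) :
    pvN X ++ [(("Step " ++ PySem.Int.toStr (((pvN X).length : Int) + 1))
                ++ ": Prepare resume and apply for ") ++ role ++ " roles"]
      = pvN (X ++ ["Prepare resume and apply for " ++ role ++ " roles"]) := by
  have h : (": Prepare resume and apply for " : String) = ": " ++ "Prepare resume and apply for " := rfl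
  rw [h, ← String.append_assoc (s₁ := "Step " ++ PySem.Int.toStr (((pvN X).length : Int) + 1))
        (s₂ := ": ") (s₃ := "Prepare resume and apply for "),
      String.append_assoc (s₂ := "Prepare resume and apply for ") (s₃ := role),
      String.append_assoc (s₂ := "Prepare resume and apply for " ++ role) (s₃ := " roles"),
      pv_snoc]

lemma pv_fold (xs X : List String) :
    xs.foldl (fun r skill => r ++ ["Step " ++ PySem.Int.toStr ((r.length : Int) + 1) ++ ": Learn " ++ skill]) (pvN X)
      = pvN (X ++ xs.map (fun skill => "Learn " ++ skill)) := by
  induction xs generalizing X with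
  | nil => simp
  | cons x xs ih =>
    rw [List.foldl_cons, pv_snoc_mid X ": Learn " "Learn " x rfl, ih, List.map_cons]
    simp [List.append_assoc]

lemma pv_baseN (time : String) :
    (if time == "1-2 months" then
      ["Step 1: Learn basic concepts quickly",
       "Step 2: Focus on 1-2 important skills",
       "Step 3: Build 1 small project",
       "Step 4: Revise and practice"]
    else if time == "3-6 months" then
      ["Step 1: Build strong fundamentals",
       "Step 2: Learn core skills deeply",
       "Step 3: Build 2-3 real-world projects",
       "Step 4: Start applying for internships/jobs"]
    else
      ["Step 1: Master core concepts",
       "Step 2: Learn advanced topics",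
       "Step 3: Build industry-level projects",
       "Step 4: Prepare for interviews"]) = pvN (pvBase time) := by
  unfold pvBase
  by_cases h1 : time = "1-2 months" <;> by_cases h2 : time = "3-6 months" <;>
    simp [h1, h2] <;> decide

lemma pv_dict (time : String) :
    (PySem.Dict.ofList
      [("1-2 months",
        ["Learn basic concepts quickly", "Focus on 1-2 important skills",
         "Build 1 small project", "Revise and practice"]),
       ("3-6 months",
        ["Build strong fundamentals", "Learn core skills deeply",
         "Build 2-3 real-world projects", "Start applying for internships/jobs"])]).getD time
      ["Master core concepts", "Learn advanced topics",
       "Build industry-level projects", "Prepare for interviews"] = pvBase time := by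
  by_cases h1 : time = "1-2 months" <;> by_cases h2 : time = "3-6 months" <;>
    simp [pvBase, PySem.Dict.ofList, PySem.Dict.update, PySem.Dict.getD_insert,
          PySem.Dict.getD_empty, h1, h2]

lemma pv_A_eq (role : String) (missing_skills : List String) (time : String) :
    generate_roadmap role missing_skills time
      = pvN (((pvBase time
              ++ (PySem.List.slice missing_skills none (some 3)).map (fun skill => "Learn " ++ skill))
              ++ pvExtras role)
              ++ ["Prepare resume and apply for " ++ role ++ " roles"]) := by
  unfold generate_roadmap
  simp only []
  rw [pv_baseN, pv_fold]
  unfold pvExtras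
  by_cases c1 : (PySem.Str.isIn "Data" role || PySem.Str.isIn "AI" role) = true <;>
  by_cases c2 : PySem.Str.isIn "Frontend" role = true <;>
  by_cases c3 : PySem.Str.isIn "Backend" role = true <;>
  by_cases c4 : (PySem.Str.isIn "DevOps" role || PySem.Str.isIn "Cloud" role) = true <;>
  by_cases c5 : PySem.Str.isIn "Cyber" role = true <;>
    simp only [c1, c2, c3, c4, c5, Bool.false_eq_true, if_true, if_false] <;>
    (try rw [pv_snoc_any _ ": Work on ML/AI projects" "Work on ML/AI projects" rfl, pv_snoc_any _ ": Practice data analysis" "Practice data analysis" rfl]) <;>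
    (try rw [pv_snoc_any _ ": Build UI projects using React" "Build UI projects using React" rfl, pv_snoc_any _ ": Improve UI/UX skills" "Improve UI/UX skills" rfl]) <;>
    (try rw [pv_snoc_any _ ": Build APIs and backend systems" "Build APIs and backend systems" rfl, pv_snoc_any _ ": Learn databases deeply" "Learn databases deeply" rfl]) <;>
    (try rw [pv_snoc_any _ ": Practice deployments" "Practice deployments" rfl, pv_snoc_any _ ": Learn cloud services" "Learn cloud services" rfl]) <;>
    (try rw [pv_snoc_any _ ": Practice security tools" "Practice security tools" rfl, pv_snoc_any _ ": Learn ethical hacking" "Learn ethical hacking" rfl]) <;>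
    rw [pv_snoc_res] <;> simp [List.append_assoc]

lemma pv_B_eq (role : String) (missing_skills : List String) (time : String) :
    generate_roadmap_alt role missing_skills time
      = pvN (((pvBase time
              ++ (PySem.List.slice missing_skills none (some 3)).map (fun skill => "Learn " ++ skill))
              ++ pvExtras role)
              ++ ["Prepare resume and apply for " ++ role ++ " roles"]) := by
  unfold generate_roadmap_alt
  simp only []
  rw [pv_dict]
  unfold pvExtras
  have hN : ∀ S : List String, (S.zipIdx 1).map pvStepFmt = pvN S := fun _ => rfl
  by_cases c1 : (PySem.Str.isIn "Data" role || PySem.Str.isIn "AI" role) = true <;>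
  by_cases c2 : PySem.Str.isIn "Frontend" role = true <;>
  by_cases c3 : PySem.Str.isIn "Backend" role = true <;>
  by_cases c4 : (PySem.Str.isIn "DevOps" role || PySem.Str.isIn "Cloud" role) = true <;>
  by_cases c5 : PySem.Str.isIn "Cyber" role = true <;>
    simp only [c1, c2, c3, c4, c5, Bool.false_eq_true, if_true, if_false] <;>
    rw [hN] <;> simp [List.append_assoc]

-- ===== VERDICT (by name: the statement is the Claim_ definition above) =====
theorem generate_roadmap_spec : Claim_equal_generate_roadmap := by
  intro role missing_skills time _
  unfold Spec_generate_roadmap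
  rw [pv_A_eq, pv_B_eq]
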